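-- pv_equiv track=rewrite | github.com/paiml/depyler | examples/hard_tridiagonal_ops.py | tridiagonal_multiply
-- ===== SOURCE A (Python) =====
-- def tridiagonal_multiply(lower: list[int], diag: list[int], upper: list[int], vec: list[int]) -> list[int]:
--     """Multiply tridiagonal matrix by vector.
--     lower[i] is subdiagonal (index 0 unused), diag[i] is diagonal, upper[i] is superdiagonal."""
--     n: int = len(diag)
--     result: list[int] = []
--     i: int = 0
--     while i < n:
--         val: int = diag[i] * vec[i]
--         if i > 0:
--             prev: int = i - 1
--             val = val + lower[i] * vec[prev]
--         if i < n - 1: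
--             next_i: int = i + 1
--             val = val + upper[i] * vec[next_i]
--         result.append(val)
--         i = i + 1
--     return result
-- ===== SOURCE B (Python) =====
-- def tridiagonal_multiply(lower: list[int], diag: list[int], upper: list[int], vec: list[int]) -> list[int]:
--     """Column-oriented (scatter) product: walk the matrix COLUMNS and scatter each
--     vec[j] into the at-most-three rows j-1, j, j+1 of the result, instead of
--     gathering the three band terms per row."""
--     n = len(diag)
--     result = [0] * n
--     for j in range(n):
--         v = vec[j]
--         result[j] += diag[j] * v
--         if j > 0:
--             result[j - 1] += upper[j - 1] * v
--         if j < n - 1: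
--             result[j + 1] += lower[j + 1] * v
--     return result
-- ===== Notes on version B (the rewrite author's own statement) =====
-- stated objective: alternative
-- what changed: Replaces A's row-oriented gather (each output gathered from the three bands at its own row) by a column-oriented scatter: one loop over matrix columns, each vec[j] scattered into result[j-1], result[j], result[j+1] of a preallocated zero vector.
import Mathlib
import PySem

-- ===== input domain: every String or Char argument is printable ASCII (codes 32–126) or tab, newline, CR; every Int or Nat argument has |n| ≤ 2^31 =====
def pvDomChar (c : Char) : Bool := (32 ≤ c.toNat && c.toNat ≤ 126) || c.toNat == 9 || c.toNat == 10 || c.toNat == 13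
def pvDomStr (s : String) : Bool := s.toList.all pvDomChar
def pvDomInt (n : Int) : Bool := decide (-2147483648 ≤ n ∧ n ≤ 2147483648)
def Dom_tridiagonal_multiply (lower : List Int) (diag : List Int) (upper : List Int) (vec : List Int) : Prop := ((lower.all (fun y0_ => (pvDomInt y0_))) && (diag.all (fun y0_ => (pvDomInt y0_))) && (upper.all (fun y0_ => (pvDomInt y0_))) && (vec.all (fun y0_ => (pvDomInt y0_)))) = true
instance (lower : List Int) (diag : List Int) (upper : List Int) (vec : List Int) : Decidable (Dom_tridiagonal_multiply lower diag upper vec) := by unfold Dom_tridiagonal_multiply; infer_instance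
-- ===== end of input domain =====

-- B is a column-oriented scatter (each vec[j] pushed into rows j-1, j, j+1 of a zero vector)
-- instead of A's row-oriented gather loop; same O(n) cost, return value proved equal on Pre_.

-- Python xs[i]; under Pre_ every access below is in range, so the getD 0 default is never taken.
def pvGet (xs : List Int) (i : Int) : Int := (PySem.List.pyGet? xs i).getD 0

-- ===== PORT A =====
def tmLoop (lower : List Int) (diag : List Int) (upper : List Int) (vec : List Int)
    (n : Nat) (i : Nat) (result : List Int) : List Int :=
  if i < n then
    let val := pvGet diag (i : Int) * pvGet vec (i : Int)
    let val := if 0 < i then val + pvGet lower (i : Int) * pvGet vec ((i : Int) - 1) else val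
    let val := if (i : Int) < (n : Int) - 1 then val + pvGet upper (i : Int) * pvGet vec ((i : Int) + 1) else val
    tmLoop lower diag upper vec n (i + 1) (result ++ [val])
  else result
termination_by n - i

def tridiagonal_multiply (lower : List Int) (diag : List Int) (upper : List Int) (vec : List Int) : List Int :=
  tmLoop lower diag upper vec diag.length 0 []

-- ===== PORT B =====
-- result[i] += x  (in-place accumulation into one cell)
def tmAddAt (r : List Int) (i : Nat) (x : Int) : List Int := r.set i (r.getD i 0 + x)

-- the body of Source B's for-loop: scatter column j into rows j, j-1, j+1
def tmColStep (lower : List Int) (diag : List Int) (upper : List Int) (vec : List Int)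
    (n : Nat) (r : List Int) (j : Nat) : List Int :=
  let v := pvGet vec (j : Int)
  let r1 := tmAddAt r j (pvGet diag (j : Int) * v)
  let r2 := if 0 < j then tmAddAt r1 (j - 1) (pvGet upper ((j : Int) - 1) * v) else r1
  if (j : Int) < (n : Int) - 1 then tmAddAt r2 (j + 1) (pvGet lower ((j : Int) + 1) * v) else r2

def tridiagonal_multiply_alt (lower : List Int) (diag : List Int) (upper : List Int) (vec : List Int) : List Int :=
  (List.range diag.length).foldl (tmColStep lower diag upper vec diag.length)
    (List.replicate diag.length 0)

-- ===== PRECONDITION & SPEC =====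
-- Exactly the inputs on which the Python A returns (no IndexError): vec long enough for all
-- accesses, and for n ≥ 2 lower indices 1..n-1 and upper indices 0..n-2 must exist.
def Pre_tridiagonal_multiply (lower : List Int) (diag : List Int) (upper : List Int) (vec : List Int) : Prop :=
  diag.length ≤ vec.length ∧
    (diag.length ≤ 1 ∨ (diag.length ≤ lower.length ∧ diag.length - 1 ≤ upper.length))
instance (lower : List Int) (diag : List Int) (upper : List Int) (vec : List Int) : Decidable (Pre_tridiagonal_multiply lower diag upper vec) := by unfold Pre_tridiagonal_multiply; infer_instance

def pvWitness_tridiagonal_multiply : List Int × List Int × List Int × List Int :=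
  ([0, 1, 2], [1, 2, 3], [4, 5, 0], [1, 1, 1])

def Spec_tridiagonal_multiply (lower : List Int) (diag : List Int) (upper : List Int) (vec : List Int) (out : List Int) : Prop := out = tridiagonal_multiply_alt lower diag upper vec
instance (lower : List Int) (diag : List Int) (upper : List Int) (vec : List Int) (out : List Int) : Decidable (Spec_tridiagonal_multiply lower diag upper vec out) := by unfold Spec_tridiagonal_multiply; infer_instance

-- ===== CLAIM (what is proved, stated in full; the proofs are below) =====
def Claim_equal_tridiagonal_multiply : Prop := ∀ (lower : List Int) (diag : List Int) (upper : List Int) (vec : List Int), Dom_tridiagonal_multiply lower diag upper vec → Pre_tridiagonal_multiply lower diag upper vec → Spec_tridiagonal_multiply lower diag upper vec (tridiagonal_multiply lower diag upper vec)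

-- ===== LEMMAS AND PROOFS =====

-- the per-row value A's loop appends at row i
def tmF (lower : List Int) (diag : List Int) (upper : List Int) (vec : List Int) (n : Nat) (i : Nat) : Int :=
  let val := pvGet diag (i : Int) * pvGet vec (i : Int)
  let val := if 0 < i then val + pvGet lower (i : Int) * pvGet vec ((i : Int) - 1) else val
  if (i : Int) < (n : Int) - 1 then val + pvGet upper (i : Int) * pvGet vec ((i : Int) + 1) else val

lemma tmLoop_eq (lower diag upper vec : List Int) (n : Nat) :
    ∀ (k i : Nat) (result : List Int), n - i = k →
      tmLoop lower diag upper vec n i result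
        = result ++ (List.range' i (n - i)).map (tmF lower diag upper vec n) := by
  intro k
  induction k with
  | zero =>
      intro i result h
      rw [tmLoop, if_neg (by omega), h]
      simp
  | succ k ih =>
      intro i result h
      have hin : i < n := by omega
      rw [tmLoop, if_pos hin, ih (i + 1) _ (by omega)]
      have hr : n - i = (n - (i + 1)) + 1 := by omega
      rw [h] at hr ⊢
      rw [hr, List.range'_succ, List.map_cons]
      simp [tmF, List.append_assoc]

-- the contribution of column j to row k, matching tmColStep's three updates
def tmContrib (lower : List Int) (diag : List Int) (upper : List Int) (vec : List Int)
    (n : Nat) (k j : Nat) : Int :=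
  (if k = j then pvGet diag (j : Int) * pvGet vec (j : Int) else 0)
    + (if 0 < j ∧ k + 1 = j then pvGet upper ((j : Int) - 1) * pvGet vec (j : Int) else 0)
    + (if (j : Int) < (n : Int) - 1 ∧ k = j + 1 then pvGet lower ((j : Int) + 1) * pvGet vec (j : Int) else 0)

lemma addAt_length (r : List Int) (i : Nat) (x : Int) : (tmAddAt r i x).length = r.length := by
  simp [tmAddAt]

lemma addAt_getD (r : List Int) (i : Nat) (hi : i < r.length) (x : Int) (k : Nat) :
    (tmAddAt r i x).getD k 0 = r.getD k 0 + if k = i then x else 0 := by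
  by_cases h : k = i
  · subst h; simp [tmAddAt, List.getD_eq_getElem?_getD, hi]
  · simp [tmAddAt, List.getD_eq_getElem?_getD, List.getElem?_set_ne (fun hh => h hh.symm), h]

lemma colStep_length (lower diag upper vec : List Int) (n : Nat) (r : List Int) (j : Nat) :
    (tmColStep lower diag upper vec n r j).length = r.length := by
  rw [tmColStep]
  split_ifs <;> simp [addAt_length]

lemma colStep_getD (lower diag upper vec : List Int) (n : Nat) (r : List Int) (j : Nat)
    (hn : r.length = n) (hj : j < n) (k : Nat) :
    (tmColStep lower diag upper vec n r j).getD k 0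
      = r.getD k 0 + tmContrib lower diag upper vec n k j := by
  rw [tmColStep, tmContrib]
  have hjr : j < r.length := by omega
  by_cases h0 : 0 < j <;> by_cases h1 : (j : Int) < (n : Int) - 1
  · rw [if_pos h0, if_pos h1,
      addAt_getD _ (j + 1) (by rw [addAt_length, addAt_length]; omega),
      addAt_getD _ (j - 1) (by rw [addAt_length]; omega),
      addAt_getD _ j hjr]
    have e2 : (k = j - 1) ↔ (k + 1 = j) := by omega
    by_cases a : k = j <;> by_cases b : k + 1 = j <;> by_cases c : k = j + 1 <;>
      simp [a, b, c, e2, h0, h1] <;> omega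
  · rw [if_pos h0, if_neg h1,
      addAt_getD _ (j - 1) (by rw [addAt_length]; omega),
      addAt_getD _ j hjr]
    have e2 : (k = j - 1) ↔ (k + 1 = j) := by omega
    by_cases a : k = j <;> by_cases b : k + 1 = j <;>
      simp [a, b, e2, h0, h1] <;> omega
  · rw [if_neg h0, if_pos h1,
      addAt_getD _ (j + 1) (by rw [addAt_length]; omega),
      addAt_getD _ j hjr]
    by_cases a : k = j <;> by_cases c : k = j + 1 <;>
      simp [a, c, h0, h1]
  · rw [if_neg h0, if_neg h1, addAt_getD _ j hjr]
    by_cases a : k = j <;> simp [a, h0, h1]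

lemma foldl_colStep_length (lower diag upper vec : List Int) (n : Nat) (cols : List Nat)
    (r : List Int) :
    (cols.foldl (tmColStep lower diag upper vec n) r).length = r.length := by
  induction cols generalizing r with
  | nil => rfl
  | cons j l ih => simp [List.foldl_cons, ih, colStep_length]

lemma foldl_colStep_getD (lower diag upper vec : List Int) (n : Nat) (cols : List Nat)
    (r : List Int) (hn : r.length = n) (hcols : ∀ j ∈ cols, j < n) (k : Nat) :
    (cols.foldl (tmColStep lower diag upper vec n) r).getD k 0
      = r.getD k 0 + (cols.map (tmContrib lower diag upper vec n k)).sum := by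
  induction cols generalizing r with
  | nil => simp
  | cons j l ih =>
      rw [List.foldl_cons,
        ih _ (by rw [colStep_length]; exact hn) (fun x hx => hcols x (by simp [hx])),
        colStep_getD _ _ _ _ _ _ _ hn (hcols j (by simp)), List.map_cons, List.sum_cons]
      ring

-- sum of pointwise sums splits
lemma sum_map_split (l : List Nat) (f g : Nat → Int) :
    (l.map (fun (j : Nat) => f j + g j)).sum = (l.map f).sum + (l.map g).sum := by
  induction l with
  | nil => simp
  | cons x xs ih => simp [ih]; ring

-- sum of a singleton-supported function over a nodup list
lemma sum_map_ite_eq (l : List Nat) (hl : l.Nodup) (t : Nat) (a : Int) :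
    (l.map (fun (j : Nat) => if t = j then a else 0)).sum = if t ∈ l then a else 0 := by
  induction l with
  | nil => simp
  | cons x xs ih =>
      have hnd := List.nodup_cons.mp hl
      by_cases h : t = x
      · subst h; simp [hnd.1, ih hnd.2]
      · simp [h, ih hnd.2]

lemma contrib_sum (lower diag upper vec : List Int) (n : Nat) (k : Nat) (hk : k < n) :
    ((List.range n).map (tmContrib lower diag upper vec n k)).sum
      = tmF lower diag upper vec n k := by
  have hnd : (List.range n).Nodup := List.nodup_range
  -- split the three terms
  have hsplit : ((List.range n).map (tmContrib lower diag upper vec n k)).sum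
      = ((List.range n).map (fun (j : Nat) => if k = j then pvGet diag (j : Int) * pvGet vec (j : Int) else 0)).sum
        + ((List.range n).map (fun (j : Nat) => if 0 < j ∧ k + 1 = j then pvGet upper ((j : Int) - 1) * pvGet vec (j : Int) else 0)).sum
        + ((List.range n).map (fun (j : Nat) => if (j : Int) < (n : Int) - 1 ∧ k = j + 1 then pvGet lower ((j : Int) + 1) * pvGet vec (j : Int) else 0)).sum := by
    rw [← sum_map_split, ← sum_map_split]
    exact congrArg List.sum (List.map_congr_left (fun j _ => by rw [tmContrib]))
  rw [hsplit]
  -- diagonal term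
  have t1 : ((List.range n).map (fun (j : Nat) => if k = j then pvGet diag (j : Int) * pvGet vec (j : Int) else 0)).sum
      = pvGet diag (k : Int) * pvGet vec (k : Int) := by
    have hc : ((List.range n).map (fun (j : Nat) => if k = j then pvGet diag (j : Int) * pvGet vec (j : Int) else 0))
        = ((List.range n).map (fun (j : Nat) => if k = j then pvGet diag (k : Int) * pvGet vec (k : Int) else 0)) := by
      refine List.map_congr_left (fun j _ => ?_)
      by_cases h : k = j
      · subst h; simp
      · simp [h]
    rw [hc, sum_map_ite_eq _ hnd, if_pos (List.mem_range.mpr hk)]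
  -- superdiagonal term (column k+1 hits row k)
  have t2 : ((List.range n).map (fun (j : Nat) => if 0 < j ∧ k + 1 = j then pvGet upper ((j : Int) - 1) * pvGet vec (j : Int) else 0)).sum
      = if (k : Int) < (n : Int) - 1 then pvGet upper (k : Int) * pvGet vec ((k : Int) + 1) else 0 := by
    have hc : ((List.range n).map (fun (j : Nat) => if 0 < j ∧ k + 1 = j then pvGet upper ((j : Int) - 1) * pvGet vec (j : Int) else 0))
        = ((List.range n).map (fun (j : Nat) => if k + 1 = j then pvGet upper (k : Int) * pvGet vec ((k : Int) + 1) else 0)) := by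
      refine List.map_congr_left (fun j _ => ?_)
      by_cases h : k + 1 = j
      · subst h
        simp
      · simp [h]
    rw [hc, sum_map_ite_eq _ hnd]
    have hm : (k + 1 ∈ List.range n) ↔ ((k : Int) < (n : Int) - 1) := by
      rw [List.mem_range]; omega
    by_cases h : (k : Int) < (n : Int) - 1 <;> simp [hm, h]
  -- subdiagonal term (column k-1 hits row k, only when 0 < k)
  have t3 : ((List.range n).map (fun (j : Nat) => if (j : Int) < (n : Int) - 1 ∧ k = j + 1 then pvGet lower ((j : Int) + 1) * pvGet vec (j : Int) else 0)).sum
      = if 0 < k then pvGet lower (k : Int) * pvGet vec ((k : Int) - 1) else 0 := by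
    by_cases h0 : 0 < k
    · have hc : ((List.range n).map (fun (j : Nat) => if (j : Int) < (n : Int) - 1 ∧ k = j + 1 then pvGet lower ((j : Int) + 1) * pvGet vec (j : Int) else 0))
          = ((List.range n).map (fun (j : Nat) => if k - 1 = j then pvGet lower (k : Int) * pvGet vec ((k : Int) - 1) else 0)) := by
        refine List.map_congr_left (fun j hj => ?_)
        have hjn : j < n := List.mem_range.mp hj
        by_cases h : k - 1 = j
        · have hkj : k = j + 1 := by omega
          have hjlt : (j : Int) < (n : Int) - 1 := by omega
          have e1 : ((j : Nat) : Int) + 1 = (k : Int) := by omega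
          have e2 : ((j : Nat) : Int) = (k : Int) - 1 := by omega
          rw [if_pos ⟨hjlt, hkj⟩, if_pos h, e1, e2]
        · have : ¬ ((j : Int) < (n : Int) - 1 ∧ k = j + 1) := by
            rintro ⟨_, hh⟩; omega
          rw [if_neg this, if_neg h]
      rw [hc, sum_map_ite_eq _ hnd, if_pos (List.mem_range.mpr (by omega)), if_pos h0]
    · have hc : ((List.range n).map (fun (j : Nat) => if (j : Int) < (n : Int) - 1 ∧ k = j + 1 then pvGet lower ((j : Int) + 1) * pvGet vec (j : Int) else 0))
          = ((List.range n).map (fun _ => (0 : Int))) := by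
        refine List.map_congr_left (fun j _ => ?_)
        have : ¬ ((j : Int) < (n : Int) - 1 ∧ k = j + 1) := by
          rintro ⟨_, hh⟩; omega
        rw [if_neg this]
      rw [hc, if_neg h0]
      simp
  rw [t1, t2, t3, tmF]
  by_cases h0 : 0 < k <;> by_cases h1 : (k : Int) < (n : Int) - 1
  · simp [h0, h1]; ring
  · simp [h0, h1]
  · simp [h0, h1]
  · simp [h0, h1]

lemma alt_getD (lower diag upper vec : List Int) (k : Nat) (hk : k < diag.length) :
    (tridiagonal_multiply_alt lower diag upper vec).getD k 0
      = tmF lower diag upper vec diag.length k := by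
  rw [tridiagonal_multiply_alt,
    foldl_colStep_getD _ _ _ _ _ _ _ (by simp) (fun j hj => List.mem_range.mp hj),
    contrib_sum _ _ _ _ _ _ hk]
  simp

lemma alt_length (lower diag upper vec : List Int) :
    (tridiagonal_multiply_alt lower diag upper vec).length = diag.length := by
  rw [tridiagonal_multiply_alt, foldl_colStep_length]
  simp

lemma main_eq (lower diag upper vec : List Int) :
    tridiagonal_multiply lower diag upper vec = tridiagonal_multiply_alt lower diag upper vec := by
  have hA : tridiagonal_multiply lower diag upper vec
      = (List.range diag.length).map (tmF lower diag upper vec diag.length) := by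
    rw [tridiagonal_multiply, tmLoop_eq lower diag upper vec diag.length diag.length 0 [] (by omega)]
    simp [List.range_eq_range']
  apply List.ext_getElem
  · rw [hA, alt_length]; simp
  · intro j h1 h2
    have hj : j < diag.length := by rw [alt_length] at h2; exact h2
    have hg := alt_getD lower diag upper vec j hj
    rw [List.getD_eq_getElem _ _ h2] at hg
    rw [List.getElem_of_eq hA h1, hg]
    simp

-- ===== VERDICT (by name: the statement is the Claim_ definition above) =====
theorem tridiagonal_multiply_spec : Claim_equal_tridiagonal_multiply := by
  intro lower diag upper vec _ _
  exact main_eq lower diag upper vec
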